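-- pv_equiv track=rewrite | github.com/Sriram-52/InfyTq | Assignement-4/Prg5.py | sms_encoding
-- ===== SOURCE A (Python) =====
-- def sms_encoding(data):
--     #start writing your code here
--     words = data.split()
--     for i in range(len(words)):
--         if len(words[i]) > 1:
--             for vowel in ['a', 'e', 'i', 'o', 'u']:
--                 words[i] = words[i].replace(vowel, "")
--             for vowel in ['A', 'E', 'I', 'O', 'U']:
--                 words[i] = words[i].replace(vowel, "")
--
--     return " ".join(words)
-- ===== SOURCE B (Python) =====
-- def sms_encoding(data):
--     vowels = set("aeiouAEIOU")
--     return " ".join(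
--         w if len(w) <= 1 else "".join(c for c in w if c not in vowels)
--         for w in data.split()
--     )
-- ===== Notes on version B (the rewrite author's own statement) =====
-- stated objective: simpler
-- what changed: replaces the ten sequential full-string replace() passes per word with a single character-filtering pass over the word using a vowel set
import Mathlib
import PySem

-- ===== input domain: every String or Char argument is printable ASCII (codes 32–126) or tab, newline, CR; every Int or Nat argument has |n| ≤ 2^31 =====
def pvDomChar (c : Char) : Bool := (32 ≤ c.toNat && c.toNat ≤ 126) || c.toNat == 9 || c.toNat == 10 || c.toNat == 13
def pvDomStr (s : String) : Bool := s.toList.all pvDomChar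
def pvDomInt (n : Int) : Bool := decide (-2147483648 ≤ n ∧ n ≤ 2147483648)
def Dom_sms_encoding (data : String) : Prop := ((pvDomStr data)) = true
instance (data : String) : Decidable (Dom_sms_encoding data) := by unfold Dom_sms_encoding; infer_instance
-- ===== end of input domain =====

-- B replaces A's ten sequential full-string replace() passes per word with one character-filtering pass over a vowel set.


-- ===== PORT A =====
-- per-word body of A's loop: the len>1 guard and the two vowel replace loops
def smsWordA (w : String) : String :=
  if 1 < PySem.Str.len w then
    ["A","E","I","O","U"].foldl (fun s v => PySem.Str.replace s v "")
      (["a","e","i","o","u"].foldl (fun s v => PySem.Str.replace s v "") w)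
  else w

def sms_encoding (data : String) : String :=
  PySem.Str.join " " ((PySem.Str.split₀ data).map smsWordA)

-- ===== PORT B =====
def smsWordB (w : String) : String :=
  if PySem.Str.len w ≤ 1 then w
  else String.ofList (w.toList.filter (fun c => !("aeiouAEIOU".toList.contains c)))

def sms_encoding_alt (data : String) : String :=
  PySem.Str.join " " ((PySem.Str.split₀ data).map smsWordB)

-- ===== PRECONDITION & SPEC =====
def Spec_sms_encoding (data : String) (out : String) : Prop := out = sms_encoding_alt data
instance (data : String) (out : String) : Decidable (Spec_sms_encoding data out) := by unfold Spec_sms_encoding; infer_instance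

-- ===== CLAIM (what is proved, stated in full; the proofs are below) =====
def Claim_equal_sms_encoding : Prop := ∀ (data : String), Dom_sms_encoding data → Spec_sms_encoding data (sms_encoding data)

-- ===== LEMMAS AND PROOFS =====

-- replace.go with a single-char pattern and empty replacement is a filter
lemma replace_go_single (v : Char) :
    ∀ (fuel : Nat) (l acc : List Char), l.length ≤ fuel →
      PySem.Chars.replace.go [v] [] fuel l acc = acc.reverse ++ l.filter (fun c => c != v) := by
  intro fuel
  induction fuel with
  | zero =>
    intro l acc h
    have : l = [] := List.eq_nil_of_length_eq_zero (Nat.le_zero.mp h)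
    subst this
    simp [PySem.Chars.replace.go]
  | succ n ih =>
    intro l acc h
    cases l with
    | nil => simp [PySem.Chars.replace.go]
    | cons c t =>
      simp only [PySem.Chars.replace.go]
      by_cases hc : c = v
      · subst hc
        have hp : List.isPrefixOf [c] (c :: t) = true := by simp [List.isPrefixOf]
        rw [if_pos hp]
        have hd : List.drop ([c].length) (c :: t) = t := by simp
        rw [hd]
        simp only [List.reverse_nil, List.nil_append]
        rw [ih t acc (by simpa using Nat.le_of_succ_le_succ h)]
        simp [List.filter]
      · have hp : List.isPrefixOf [v] (c :: t) = false := by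
          simp [List.isPrefixOf]; exact fun hh => (hc hh.symm).elim
        rw [if_neg (by simp [hp])]
        rw [ih t (c :: acc) (by simpa using Nat.le_of_succ_le_succ h)]
        have : (c != v) = true := by simp [hc]
        simp [List.filter, this]

lemma replace_single (v : Char) (cs : List Char) :
    PySem.Chars.replace cs [v] [] = cs.filter (fun c => c != v) := by
  rw [PySem.Chars.replace]
  rw [if_neg (by simp)]
  simpa using replace_go_single v cs.length cs [] (le_refl _)

lemma toList_strReplace_single (s : String) (v : Char) :
    (PySem.Str.replace s (String.ofList [v]) "").toList = s.toList.filter (fun c => c != v) := by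
  rw [PySem.Str.toList_replace]
  have h1 : (String.ofList [v]).toList = [v] := by simp
  have h2 : ("" : String).toList = [] := rfl
  rw [h1, h2, replace_single]

-- folding single-char replaces over a vowel list is one filter over its characters
lemma foldl_replace_filter (vs : List Char) (s : String) :
    ((vs.map (fun v => String.ofList [v])).foldl (fun s v => PySem.Str.replace s v "") s).toList
      = s.toList.filter (fun c => !vs.contains c) := by
  induction vs generalizing s with
  | nil => simp
  | cons v t ih =>
    simp only [List.map_cons, List.foldl_cons]
    rw [ih, toList_strReplace_single, List.filter_filter]
    apply List.filter_congr
    intro c _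
    rw [Bool.eq_iff_iff]
    simp
    tauto

-- the per-word results agree
lemma smsWord_eq (w : String) : smsWordA w = smsWordB w := by
  unfold smsWordA smsWordB
  rcases lt_or_ge (1 : Int) (PySem.Str.len w) with h | h
  · rw [if_pos h, if_neg (by omega)]
    have e1 : (["a","e","i","o","u"] : List String)
        = (['a','e','i','o','u'].map (fun v => String.ofList [v])) := rfl
    have e2 : (["A","E","I","O","U"] : List String)
        = (['A','E','I','O','U'].map (fun v => String.ofList [v])) := rfl
    rw [e1, e2]
    conv_lhs => rw [← String.ofList_toList (s := List.foldl _ _ _)]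
    rw [foldl_replace_filter, foldl_replace_filter, List.filter_filter]
    congr 1
    apply List.filter_congr
    intro c _
    have hv : "aeiouAEIOU".toList = ['a','e','i','o','u','A','E','I','O','U'] := rfl
    rw [hv]
    rw [Bool.eq_iff_iff]
    simp
    tauto
  · rw [if_neg (by omega), if_pos (by omega)]

-- ===== VERDICT (by name: the statement is the Claim_ definition above) =====
theorem sms_encoding_spec : Claim_equal_sms_encoding := by
  intro data _
  show sms_encoding data = sms_encoding_alt data
  unfold sms_encoding sms_encoding_alt
  rw [List.map_congr_left (fun w _ => smsWord_eq w)]
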